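-- pv_equiv track=rewrite | github.com/whitem4rk/2023-algorithm-study | LEVEL 1/doll.py | solution
-- ===== SOURCE A (Python) =====
-- def solution(board, moves):
--     answer = 0
--
--     # 크레인으로 옮겨닮을 바구니
--     basket = []
--     # board transpose하고 0이 아닌값만 queue로 관리
--     transpose = [ [] for _ in range(len(board))]
--     for i in range(len(board)):
--         for j in range(len(board)):
--             if board[j][i] != 0:
--                 transpose[i].append(board[j][i])
--
--     # crane 수행
--     for move in moves:
--         # 해당 열의 크기가 0이 아님을 확인
--         if len(transpose[move-1]) != 0:
--             crane = transpose[move-1].pop(0)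
--             basket.append(crane)
--             # 바구니 크기가 2 이상임을 확인 / 상위 2개가 같을 시 삭제
--             if len(basket) >= 2 and basket[-1] == basket[-2]:
--                 basket.pop()
--                 basket.pop()
--                 answer += 2
--
--     return answer
-- ===== SOURCE B (Python) =====
-- def solution(board, moves):
--     # Lazy per-column pointers instead of pre-building transposed queues.
--     n = len(board)
--     ptr = [0] * n
--     basket = []
--     answer = 0
--     for move in moves:
--         col = move - 1
--         r = ptr[col]
--         while r < n and board[r][col] == 0:
--             r += 1
--         if r < n:
--             crane = board[r][col]
--             ptr[col] = r + 1
--             if basket and basket[-1] == crane: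
--                 basket.pop()
--                 answer += 2
--             else:
--                 basket.append(crane)
--         else:
--             ptr[col] = r
--     return answer
-- ===== Notes on version B (the rewrite author's own statement) =====
-- stated objective: alternative
-- what changed: Drops A's transpose/queue pre-build and list pop(0) entirely; B keeps a per-column row pointer and lazily skips zeros in each column on demand, with the pair-pop done by comparing the basket top before pushing.
-- outside the precondition, e.g. on solution([[1, 2, 3], [1, 2, 3]], [0, 2]): A returns 2, B returns 0
import Mathlib
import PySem

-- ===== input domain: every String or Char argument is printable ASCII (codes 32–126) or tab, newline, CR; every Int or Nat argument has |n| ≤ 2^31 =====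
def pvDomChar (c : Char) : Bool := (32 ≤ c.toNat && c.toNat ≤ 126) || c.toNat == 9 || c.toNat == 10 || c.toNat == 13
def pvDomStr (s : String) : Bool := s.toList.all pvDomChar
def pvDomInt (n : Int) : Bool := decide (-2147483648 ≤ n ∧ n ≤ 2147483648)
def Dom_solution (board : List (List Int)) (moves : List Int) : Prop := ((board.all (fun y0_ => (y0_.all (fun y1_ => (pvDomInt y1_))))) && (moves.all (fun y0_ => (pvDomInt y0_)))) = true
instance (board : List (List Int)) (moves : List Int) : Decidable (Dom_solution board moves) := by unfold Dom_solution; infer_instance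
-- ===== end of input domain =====

-- B drops A's transpose/queue pre-build: it keeps a per-column row pointer and lazily
-- skips zeros in each column on demand (alternative decomposition; return value only —
-- neither Python mutates its arguments).


-- ===== PORT A =====
-- literal port of A: pre-build the transposed zero-free queues, then pop from them;
-- the basket is kept top-first (Python appends/pops at its end; the values are the same);
-- list indexing by `move-1` uses PySem (Python's negative-index wraparound, total
-- via the default only where Pre_ guarantees the index is in range)
def buildA (board : List (List Int)) : List (List Int) :=
  (List.range board.length).foldl (fun tp i =>
      (List.range board.length).foldl (fun tp j =>
        if (board.getD j []).getD i 0 ≠ 0 then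
          tp.modify i (fun q => q ++ [(board.getD j []).getD i 0])
        else tp) tp)
    (List.replicate board.length [])

-- the body of A's `for move in moves` loop, state = (answer, basket, transpose)
def craneStepA (st : Int × List Int × List (List Int)) (move : Int) :
    Int × List Int × List (List Int) :=
  let (answer, basket, tp) := st
  let q := PySem.List.pyGetD tp (move - 1) []
  if q.length ≠ 0 then
    let crane := q.headD 0
    let tp := PySem.List.pySetD tp (move - 1) q.tail
    let basket := crane :: basket
    if 2 ≤ basket.length ∧ basket.head? = basket.tail.head? then
      (answer + 2, basket.drop 2, tp)
    else (answer, basket, tp)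
  else st

def solution (board : List (List Int)) (moves : List Int) : Int :=
  (moves.foldl craneStepA (0, [], buildA board)).1

-- ===== PORT B =====
-- the `while r < n and board[r][col] == 0: r += 1` loop of Source B (col indexes the row
-- with Python semantics: negative col wraps)
def scanColB (board : List (List Int)) (n : Nat) (c : Int) (r : Nat) : Nat :=
  if h : r < n ∧ PySem.List.pyGetD (board.getD r []) c 0 = 0 then scanColB board n c (r + 1)
  else r
termination_by n - r
decreasing_by all_goals omega

-- the body of Source B's `for move in moves` loop, state = (answer, basket, ptr)
def craneStepB (board : List (List Int)) (n : Nat) (st : Int × List Int × List Nat)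
    (move : Int) : Int × List Int × List Nat :=
  let (answer, basket, ptr) := st
  let col := move - 1
  let r := scanColB board n col (PySem.List.pyGetD ptr col 0)
  if r < n then
    let crane := PySem.List.pyGetD (board.getD r []) col 0
    let ptr := PySem.List.pySetD ptr col (r + 1)
    match basket with
    | b :: bs => if b = crane then (answer + 2, bs, ptr) else (answer, crane :: b :: bs, ptr)
    | [] => (answer, [crane], ptr)
  else (answer, basket, PySem.List.pySetD ptr col r)

def solution_alt (board : List (List Int)) (moves : List Int) : Int :=
  (moves.foldl (craneStepB board board.length)
      (0, [], List.replicate board.length 0)).1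

-- ===== PRECONDITION & SPEC =====
-- Pre_ excludes (a) the inputs where A raises IndexError (a row shorter than
-- board.length, or a move outside Python's index range 1-n..n of the transposed list),
-- and (b) non-positive moves on a NON-SQUARE board: there the column picked by Python's
-- negative-index wraparound depends on which list is indexed (A wraps the n transposed
-- queues, B wraps each row), an accidental corner the puzzle never specifies.
def Pre_solution (board : List (List Int)) (moves : List Int) : Prop :=
  (∀ row ∈ board, board.length ≤ row.length) ∧
    (∀ m ∈ moves, 1 - (board.length : Int) ≤ m ∧ m ≤ (board.length : Int)) ∧
    ((∀ m ∈ moves, 1 ≤ m) ∨ (∀ row ∈ board, row.length = board.length))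
instance (board : List (List Int)) (moves : List Int) : Decidable (Pre_solution board moves) := by unfold Pre_solution; infer_instance

def pvWitness_solution : List (List Int) × List Int := ([[0, 0], [1, 1]], [1, 2])

def Spec_solution (board : List (List Int)) (moves : List Int) (out : Int) : Prop := out = solution_alt board moves
instance (board : List (List Int)) (moves : List Int) (out : Int) : Decidable (Spec_solution board moves out) := by unfold Spec_solution; infer_instance

-- ===== CLAIM (what is proved, stated in full; the proofs are below) =====
def Claim_equal_solution : Prop := ∀ (board : List (List Int)) (moves : List Int), Dom_solution board moves → Pre_solution board moves → Spec_solution board moves (solution board moves)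

-- ===== LEMMAS AND PROOFS =====

-- the effective (wrapped) 0-based column index of move m on n columns
def pvEff (n : Nat) (m : Int) : Nat :=
  if m ≤ 0 then ((n : Int) + m - 1).toNat else (m - 1).toNat

theorem pvEff_lt (n : Nat) (m : Int) (h1 : 1 - (n : Int) ≤ m) (h2 : m ≤ (n : Int)) :
    pvEff n m < n := by
  unfold pvEff; split <;> omega

theorem pyIdx?_eff (n : Nat) (m : Int) (h1 : 1 - (n : Int) ≤ m) (h2 : m ≤ (n : Int)) :
    PySem.List.pyIdx? n (m - 1) = some (pvEff n m) := by
  unfold PySem.List.pyIdx?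
  by_cases hp : 0 ≤ m - 1
  · rw [if_pos hp, if_pos (by omega)]
    unfold pvEff
    rw [if_neg (by omega)]
  · rw [if_neg hp, if_pos (by omega)]
    unfold pvEff
    rw [if_pos (by omega)]
    simp only [Option.some.injEq]
    omega

theorem pyGetD_pos {α : Type} (xs : List α) (m : Int) (d : α)
    (h1 : 1 ≤ m) (h2 : m - 1 < (xs.length : Int)) :
    PySem.List.pyGetD xs (m - 1) d = xs.getD (m - 1).toNat d := by
  simp only [PySem.List.pyGetD, PySem.List.pyGet?, PySem.List.pyIdx?]
  rw [if_pos (by omega : (0 : Int) ≤ m - 1), if_pos h2]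
  simp [List.getD_eq_getElem?_getD]

theorem pyGetD_eff {α : Type} (xs : List α) (n : Nat) (m : Int) (d : α)
    (hlen : xs.length = n) (h1 : 1 - (n : Int) ≤ m) (h2 : m ≤ (n : Int)) :
    PySem.List.pyGetD xs (m - 1) d = xs.getD (pvEff n m) d := by
  simp only [PySem.List.pyGetD, PySem.List.pyGet?, hlen, pyIdx?_eff n m h1 h2,
    Option.bind_some, List.getD_eq_getElem?_getD]

theorem pySetD_eff {α : Type} (xs : List α) (n : Nat) (m : Int) (v : α)
    (hlen : xs.length = n) (h1 : 1 - (n : Int) ≤ m) (h2 : m ≤ (n : Int)) :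
    PySem.List.pySetD xs (m - 1) v = xs.set (pvEff n m) v := by
  simp only [PySem.List.pySetD, PySem.List.pySet?, hlen, pyIdx?_eff n m h1 h2,
    Option.map_some, Option.getD_some]

-- the cell accessor in wrap-free (Nat column) form
def pvCell (board : List (List Int)) (r c : Nat) : Int := (board.getD r []).getD c 0

-- the Nat-column form of B's zero-skipping scan
def pvScan (board : List (List Int)) (n c r : Nat) : Nat :=
  if h : r < n ∧ pvCell board r c = 0 then pvScan board n c (r + 1) else r
termination_by n - r
decreasing_by all_goals omega

-- under Pre_, every row access of a move resolves to the same effective column,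
-- so B's Int-column scan is the Nat-column scan
theorem scanColB_eq_pvScan (board : List (List Int)) (n : Nat) (m : Int)
    (hcell : ∀ r, r < n →
      PySem.List.pyGetD (board.getD r []) (m - 1) 0 = pvCell board r (pvEff n m)) :
    ∀ r, scanColB board n (m - 1) r = pvScan board n (pvEff n m) r := by
  intro r
  fun_induction pvScan board n (pvEff n m) r with
  | case1 r h ih =>
    have hcond : r < n ∧ PySem.List.pyGetD (board.getD r []) (m - 1) 0 = 0 :=
      ⟨h.1, by rw [hcell r h.1]; exact h.2⟩
    rw [scanColB, dif_pos hcond, ih]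
  | case2 r h =>
    rw [scanColB,
      dif_neg (fun hc : r < n ∧ PySem.List.pyGetD (board.getD r []) (m - 1) 0 = 0 =>
        h ⟨hc.1, by rw [← hcell r hc.1]; exact hc.2⟩)]

-- the zero-free tail of column c from row r on
def pvColFrom (board : List (List Int)) (n c r : Nat) : List Int :=
  if h : r < n then
    (if pvCell board r c ≠ 0 then pvCell board r c :: pvColFrom board n c (r + 1)
     else pvColFrom board n c (r + 1))
  else []
termination_by n - r
decreasing_by all_goals omega

theorem colFrom_scan (board : List (List Int)) (n c : Nat) : ∀ r,
    pvColFrom board n c r =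
      (if pvScan board n c r < n then
        pvCell board (pvScan board n c r) c :: pvColFrom board n c (pvScan board n c r + 1)
      else []) := by
  intro r
  fun_induction pvScan board n c r with
  | case1 r h ih =>
    rw [pvColFrom, dif_pos h.1, if_neg (by simp only [ne_eq, not_not]; exact h.2), ih]
  | case2 r h =>
    by_cases hr : r < n
    · have hc : pvCell board r c ≠ 0 := fun hz => h ⟨hr, hz⟩
      rw [pvColFrom, dif_pos hr, if_pos hc, if_pos hr]
    · rw [pvColFrom, dif_neg hr, if_neg hr]

theorem colFrom_ge (board : List (List Int)) (n c r : Nat) (h : n ≤ r) :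
    pvColFrom board n c r = [] := by
  rw [pvColFrom, dif_neg (by omega)]

-- ---- build-phase characterisation ----

theorem getD_modify_append (tp : List (List Int)) (i k : Nat) (v : Int) (hi : i < tp.length) :
    (tp.modify i (fun q => q ++ [v])).getD k [] =
      if k = i then tp.getD k [] ++ [v] else tp.getD k [] := by
  by_cases h : k = i
  · subst h
    simp [List.getD_eq_getElem?_getD, List.getElem?_modify, List.getElem?_eq_getElem hi]
  · simp [List.getD_eq_getElem?_getD, List.getElem?_modify, h, Ne.symm h]

theorem getD_set_of_lt (tp : List (List Int)) (i k : Nat) (v : List Int) (hi : i < tp.length) :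
    (tp.set i v).getD k [] = if k = i then v else tp.getD k [] := by
  by_cases h : k = i
  · subst h; simp [List.getD_eq_getElem?_getD, List.getElem?_set, hi]
  · simp [List.getD_eq_getElem?_getD, List.getElem?_set, h, Ne.symm h]

theorem getD_set_nat (ptr : List Nat) (i k : Nat) (v : Nat) (hi : i < ptr.length) :
    (ptr.set i v).getD k 0 = if k = i then v else ptr.getD k 0 := by
  by_cases h : k = i
  · subst h; simp [List.getD_eq_getElem?_getD, List.getElem?_set, hi]
  · simp [List.getD_eq_getElem?_getD, List.getElem?_set, h, Ne.symm h]

theorem inner_getD (board : List (List Int)) (i : Nat) :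
    ∀ (js : List Nat) (tp : List (List Int)), i < tp.length → ∀ k,
      ((js.foldl (fun tp j =>
          if (board.getD j []).getD i 0 ≠ 0 then
            tp.modify i (fun q => q ++ [(board.getD j []).getD i 0])
          else tp) tp).getD k []) =
        if k = i then
          tp.getD i [] ++ js.filterMap (fun j => if pvCell board j i ≠ 0 then some (pvCell board j i) else none)
        else tp.getD k [] := by
  intro js
  induction js with
  | nil =>
    intro tp hlen k
    by_cases hk : k = i <;> simp [hk]
  | cons j js ih =>
    intro tp hlen k
    simp only [List.foldl_cons, List.filterMap_cons]
    by_cases hz : (board.getD j []).getD i 0 ≠ 0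
    · rw [if_pos hz,
        ih (tp.modify i (fun q => q ++ [(board.getD j []).getD i 0])) (by simpa using hlen) k,
        getD_modify_append tp i i _ hlen]
      by_cases hk : k = i
      · have hzc : pvCell board j i ≠ 0 := by simpa [pvCell] using hz
        subst hk
        rw [if_pos rfl, if_pos rfl, if_pos hzc, List.append_assoc]
        simp [pvCell, List.getD_eq_getElem?_getD]
      · rw [if_neg hk, if_neg hk, getD_modify_append tp i k _ hlen, if_neg hk]
    · rw [if_neg hz, ih tp hlen k]
      have hz0 : pvCell board j i = 0 := by
        simpa [pvCell] using hz
      simp [hz0]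

theorem inner_length (board : List (List Int)) (i : Nat) :
    ∀ (js : List Nat) (tp : List (List Int)),
      (js.foldl (fun tp j =>
          if (board.getD j []).getD i 0 ≠ 0 then
            tp.modify i (fun q => q ++ [(board.getD j []).getD i 0])
          else tp) tp).length = tp.length := by
  intro js
  induction js with
  | nil => intro tp; rfl
  | cons j js ih =>
    intro tp
    rw [List.foldl_cons]
    split
    · rw [ih, List.length_modify]
    · rw [ih]

theorem filterMap_range'_colFrom (board : List (List Int)) (n c : Nat) : ∀ k r, k = n - r →
    (List.range' r k).filterMap
        (fun j => if pvCell board j c ≠ 0 then some (pvCell board j c) else none)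
      = pvColFrom board n c r := by
  intro k
  induction k with
  | zero => intro r hk; rw [colFrom_ge board n c r (by omega)]; rfl
  | succ k ih =>
    intro r hk
    have hr : r < n := by omega
    rw [List.range'_succ, List.filterMap_cons, ih (r + 1) (by omega)]
    conv_rhs => rw [pvColFrom]
    rw [dif_pos hr]
    by_cases hc : pvCell board r c ≠ 0 <;> simp [hc]

theorem outer_length (board : List (List Int)) (n : Nat) :
    ∀ (is : List Nat) (tp : List (List Int)),
      (is.foldl (fun tp i =>
          (List.range n).foldl (fun tp j =>
            if (board.getD j []).getD i 0 ≠ 0 then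
              tp.modify i (fun q => q ++ [(board.getD j []).getD i 0])
            else tp) tp) tp).length = tp.length := by
  intro is
  induction is with
  | nil => intro tp; rfl
  | cons i is ih => intro tp; rw [List.foldl_cons, ih, inner_length]

theorem build_fold_getD (board : List (List Int)) (n : Nat) :
    ∀ (is : List Nat) (tp : List (List Int)), tp.length = n → is.Nodup →
      (∀ k ∈ is, k < n) → (∀ k ∈ is, tp.getD k [] = []) →
      ∀ k, ((is.foldl (fun tp i =>
          (List.range n).foldl (fun tp j =>
            if (board.getD j []).getD i 0 ≠ 0 then
              tp.modify i (fun q => q ++ [(board.getD j []).getD i 0])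
            else tp) tp) tp).getD k []) =
        if k ∈ is then pvColFrom board n k 0 else tp.getD k [] := by
  intro is
  induction is with
  | nil => intro tp _ _ _ _ k; simp
  | cons i is ih =>
    intro tp hlen hnd hlt hemp k
    rw [List.foldl_cons]
    have hi : i < tp.length := by rw [hlen]; exact hlt i (by simp)
    have hstep : ∀ k', ((List.range n).foldl (fun tp j =>
          if (board.getD j []).getD i 0 ≠ 0 then
            tp.modify i (fun q => q ++ [(board.getD j []).getD i 0])
          else tp) tp).getD k' [] =
        if k' = i then pvColFrom board n i 0 else tp.getD k' [] := by
      intro k'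
      rw [inner_getD board i (List.range n) tp hi k']
      by_cases hk : k' = i
      · rw [if_pos hk, if_pos hk, hemp i (by simp), List.range_eq_range',
          filterMap_range'_colFrom board n i n 0 (by omega)]
        simp
      · rw [if_neg hk, if_neg hk]
    rw [ih _ (by rw [inner_length]; exact hlen)
        (List.Nodup.of_cons hnd)
        (fun k' hk' => hlt k' (by simp [hk']))
        (fun k' hk' => by
          rw [hstep k',
            if_neg (fun h => (List.nodup_cons.mp hnd).1 (by rw [← h]; exact hk'))]
          exact hemp k' (by simp [hk'])) k]
    by_cases hki : k = i
    · subst hki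
      rw [if_neg (List.nodup_cons.mp hnd).1, hstep k, if_pos rfl, if_pos (by simp)]
    · by_cases hkm : k ∈ is
      · rw [if_pos hkm, if_pos (by simp [hkm])]
      · rw [if_neg hkm, hstep k, if_neg hki, if_neg (by simp [hki, hkm])]

-- ---- crane-phase invariant ----

def pvInv (board : List (List Int)) (n : Nat)
    (stA : Int × List Int × List (List Int)) (stB : Int × List Int × List Nat) : Prop :=
  stA.1 = stB.1 ∧ stA.2.1 = stB.2.1 ∧ stA.2.2.length = n ∧ stB.2.2.length = n ∧
    ∀ c, c < n → stA.2.2.getD c [] = pvColFrom board n c (stB.2.2.getD c 0)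

theorem step_inv (board : List (List Int)) (n : Nat) (hn : n = board.length) (m : Int)
    (hm : 1 - (n : Int) ≤ m ∧ m ≤ (n : Int))
    (hrows : ∀ row ∈ board, n ≤ row.length)
    (hsq : 1 ≤ m ∨ ∀ row ∈ board, row.length = n)
    (a : Int) (bk : List Int) (tp : List (List Int)) (ptr : List Nat)
    (htp : tp.length = n) (hptr : ptr.length = n)
    (hcols : ∀ c, c < n → tp.getD c [] = pvColFrom board n c (ptr.getD c 0)) :
    pvInv board n (craneStepA (a, bk, tp) m) (craneStepB board n (a, bk, ptr) m) := by
  obtain ⟨col, hcoleq⟩ : ∃ col, pvEff n m = col := ⟨_, rfl⟩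
  have hcol : col < n := by rw [← hcoleq]; exact pvEff_lt n m hm.1 hm.2
  have hcell : ∀ r, r < n →
      PySem.List.pyGetD (board.getD r []) (m - 1) 0 = pvCell board r col := by
    intro r hr
    have hrow : board.getD r [] ∈ board := by
      have : r < board.length := by omega
      simp [List.getD_eq_getElem?_getD, List.getElem?_eq_getElem this]
    rcases hsq with hpos | hsquare
    · have hl := hrows _ hrow
      rw [pyGetD_pos (board.getD r []) m 0 hpos (by push_cast; omega)]
      have hceq : (m - 1).toNat = col := by rw [← hcoleq]; unfold pvEff; split <;> omega
      rw [hceq]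
      rfl
    · rw [pyGetD_eff (board.getD r []) n m 0 (hsquare _ hrow) hm.1 hm.2, hcoleq]
      rfl
  obtain ⟨r0, hr0eq⟩ : ∃ r0, ptr.getD col 0 = r0 := ⟨_, rfl⟩
  obtain ⟨rs, hrseq⟩ : ∃ rs, pvScan board n col r0 = rs := ⟨_, rfl⟩
  have hgptr : PySem.List.pyGetD ptr (m - 1) 0 = r0 := by
    rw [pyGetD_eff ptr n m 0 hptr hm.1 hm.2, hcoleq, hr0eq]
  have hscan : scanColB board n (m - 1) (PySem.List.pyGetD ptr (m - 1) 0) = rs := by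
    rw [hgptr, scanColB_eq_pvScan board n m (by rw [hcoleq]; exact hcell) r0, hcoleq, hrseq]
  have hgtp : PySem.List.pyGetD tp (m - 1) [] = tp.getD col [] := by
    rw [pyGetD_eff tp n m [] htp hm.1 hm.2, hcoleq]
  have hstp : ∀ v, PySem.List.pySetD tp (m - 1) v = tp.set col v := by
    intro v; rw [pySetD_eff tp n m v htp hm.1 hm.2, hcoleq]
  have hsptr : ∀ v, PySem.List.pySetD ptr (m - 1) v = ptr.set col v := by
    intro v; rw [pySetD_eff ptr n m v hptr hm.1 hm.2, hcoleq]
  have hq : tp.getD col [] =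
      (if rs < n then pvCell board rs col :: pvColFrom board n col (rs + 1) else []) := by
    rw [hcols col hcol, hr0eq, colFrom_scan board n col r0, hrseq]
  by_cases hlt : rs < n
  · rw [if_pos hlt] at hq
    have hinv2 : ∀ c, c < n →
        (tp.set col (tp.getD col []).tail).getD c [] =
          pvColFrom board n c ((ptr.set col (rs + 1)).getD c 0) := by
      intro c hc
      rw [getD_set_of_lt tp col c _ (by omega), getD_set_nat ptr col c _ (by omega)]
      by_cases hcc : c = col
      · rw [if_pos hcc, if_pos hcc, hcc, hq, List.tail_cons]
      · rw [if_neg hcc, if_neg hcc]; exact hcols c hc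
    have hqlen : (tp.getD col []).length ≠ 0 := by rw [hq]; simp
    have hcrane : (tp.getD col []).headD 0 = pvCell board rs col := by rw [hq]; rfl
    cases bk with
    | nil =>
      have hA : craneStepA (a, [], tp) m =
          (a, [(tp.getD col []).headD 0], tp.set col (tp.getD col []).tail) := by
        simp only [craneStepA, hgtp, hstp]
        rw [if_pos hqlen, if_neg (by simp)]
      have hB : craneStepB board n (a, [], ptr) m =
          (a, [pvCell board rs col], ptr.set col (rs + 1)) := by
        simp only [craneStepB, hscan, hsptr, hcell rs hlt]
        rw [if_pos hlt]
      rw [hA, hB]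
      exact ⟨rfl, by rw [hcrane], by simp [htp], by simp [hptr], hinv2⟩
    | cons b bs =>
      by_cases hbc : b = pvCell board rs col
      · have hA : craneStepA (a, b :: bs, tp) m =
            (a + 2, bs, tp.set col (tp.getD col []).tail) := by
          simp only [craneStepA, hgtp, hstp]
          rw [if_pos hqlen,
            if_pos ⟨by simp, by rw [List.head?_cons, List.tail_cons, List.head?_cons, hcrane, hbc]⟩]
          simp
        have hB : craneStepB board n (a, b :: bs, ptr) m =
            (a + 2, bs, ptr.set col (rs + 1)) := by
          simp only [craneStepB, hscan, hsptr, hcell rs hlt]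
          rw [if_pos hlt, if_pos hbc]
        rw [hA, hB]
        exact ⟨rfl, rfl, by simp [htp], by simp [hptr], hinv2⟩
      · have hA : craneStepA (a, b :: bs, tp) m =
            (a, (tp.getD col []).headD 0 :: b :: bs, tp.set col (tp.getD col []).tail) := by
          simp only [craneStepA, hgtp, hstp]
          rw [if_pos hqlen, if_neg (by
            simp only [List.head?_cons, List.tail_cons, List.length_cons]
            intro hcontr
            exact hbc (by rw [← hcrane]; exact (Option.some_inj.mp hcontr.2).symm))]
        have hB : craneStepB board n (a, b :: bs, ptr) m =
            (a, pvCell board rs col :: b :: bs, ptr.set col (rs + 1)) := by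
          simp only [craneStepB, hscan, hsptr, hcell rs hlt]
          rw [if_pos hlt, if_neg hbc]
        rw [hA, hB]
        exact ⟨rfl, by rw [hcrane], by simp [htp], by simp [hptr], hinv2⟩
  · rw [if_neg hlt] at hq
    have hA : craneStepA (a, bk, tp) m = (a, bk, tp) := by
      simp only [craneStepA, hgtp, hstp]
      rw [if_neg (by rw [hq]; simp)]
    have hB : craneStepB board n (a, bk, ptr) m = (a, bk, ptr.set col rs) := by
      simp only [craneStepB, hscan, hsptr]
      rw [if_neg hlt]
    rw [hA, hB]
    refine ⟨rfl, rfl, htp, by simp [hptr], ?_⟩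
    intro c hc
    rw [getD_set_nat ptr col c _ (by omega)]
    by_cases hcc : c = col
    · rw [if_pos hcc, hcc, hq, colFrom_ge board n col rs (by omega)]
    · rw [if_neg hcc]; exact hcols c hc

theorem loop_inv (board : List (List Int)) (n : Nat) (hn : n = board.length)
    (hrows : ∀ row ∈ board, n ≤ row.length) :
    ∀ (moves : List Int) (stA : Int × List Int × List (List Int)) (stB : Int × List Int × List Nat),
      (∀ m ∈ moves, 1 - (n : Int) ≤ m ∧ m ≤ (n : Int)) →
      ((∀ m ∈ moves, 1 ≤ m) ∨ ∀ row ∈ board, row.length = n) →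
      pvInv board n stA stB →
      pvInv board n (moves.foldl craneStepA stA) (moves.foldl (craneStepB board n) stB) := by
  intro moves
  induction moves with
  | nil => intro stA stB _ _ h; exact h
  | cons m ms ih =>
    rintro ⟨a, bk, tp⟩ ⟨a2, bk2, ptr⟩ hms hsq h
    obtain ⟨ha, hbk, htp, hptr, hcols⟩ := h
    simp only at ha hbk htp hptr hcols
    rw [List.foldl_cons, List.foldl_cons, ← ha, ← hbk]
    refine ih _ _ (fun m2 hm2 => hms m2 (by simp [hm2])) ?_
      (step_inv board n hn m (hms m (by simp)) hrows ?_ a bk tp ptr htp hptr hcols)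
    · rcases hsq with hpos | hsquare
      · exact Or.inl (fun m2 hm2 => hpos m2 (by simp [hm2]))
      · exact Or.inr hsquare
    · rcases hsq with hpos | hsquare
      · exact Or.inl (hpos m (by simp))
      · exact Or.inr hsquare

-- ===== VERDICT (by name: the statement is the Claim_ definition above) =====
theorem solution_spec : Claim_equal_solution := by
  intro board moves _hDom hPre
  unfold Spec_solution solution solution_alt
  have hinv : pvInv board board.length (0, [], buildA board)
      (0, [], List.replicate board.length 0) := by
    refine ⟨rfl, rfl, ?_, by simp, ?_⟩
    · unfold buildA; rw [outer_length]; simp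
    · intro c hc
      have hb := build_fold_getD board board.length (List.range board.length)
        (List.replicate board.length []) (by simp) (List.nodup_range)
        (fun k hk => by simpa using hk)
        (fun k hk => by simp [List.getD_eq_getElem?_getD,
          List.mem_range.mp hk])
        c
      unfold buildA
      rw [hb, if_pos (List.mem_range.mpr hc)]
      have : (List.replicate board.length (0 : Nat)).getD c 0 = 0 := by
        simp [List.getD_eq_getElem?_getD, hc]
      rw [this]
  exact (loop_inv board board.length rfl hPre.1 moves _ _ hPre.2.1 hPre.2.2 hinv).1
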